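-- pv_equiv track=rewrite | github.com/ajc24/ProjectY4 | WebValidation.py | validatePasswordEntry
-- ===== SOURCE A (Python) =====
-- def validatePasswordEntry(password, numberOfErrors, errorMessages):
--     if password == "":
--         numberOfErrors += 1
--         errorMessages += str(numberOfErrors) + ": You have not entered a password.\n"
--
--     if password.__len__() < 3:
--         numberOfErrors += 1
--         errorMessages += str(numberOfErrors) + ": The password you entered is too short. It must be at least 3 characters in length.\n"
--
--     if password.__len__() > 50:
--         numberOfErrors += 1
--         errorMessages += str(numberOfErrors) + ": The password you entered is too long (max 50 characters).\n"
--
--     foundUpper = False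
--     foundLower = False
--     foundNumber = False
--     index = 0
--     while index < password.__len__() and (foundUpper == False or foundLower == False or foundNumber == False):
--         if password[index].isupper() and foundUpper == False:
--             foundUpper = True
--         elif password[index].islower() and foundLower == False:
--             foundLower = True
--         elif password[index].isnumeric() and foundNumber == False:
--             foundNumber = True
--         index += 1
--
--     if foundUpper == False:
--         numberOfErrors += 1
--         errorMessages += str(numberOfErrors) + ": The password you entered does not contain an uppercase character.\n"
--
--     if foundLower == False:
--         numberOfErrors += 1
--         errorMessages += str(numberOfErrors) + ": The password you entered does not contain a lowercase character.\n"
--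
--     if foundNumber == False:
--         numberOfErrors += 1
--         errorMessages += str(numberOfErrors) + ": The password you entered does not contain a number.\n"
--
--     return [numberOfErrors, errorMessages]
-- ===== SOURCE B (Python) =====
-- def validatePasswordEntry(password, numberOfErrors, errorMessages):
--     checks = [
--         (password == "", "You have not entered a password."),
--         (len(password) < 3, "The password you entered is too short. It must be at least 3 characters in length."),
--         (len(password) > 50, "The password you entered is too long (max 50 characters)."),
--         (not any(c.isupper() for c in password), "The password you entered does not contain an uppercase character."),
--         (not any(c.islower() for c in password), "The password you entered does not contain a lowercase character."),
--         (not any(c.isnumeric() for c in password), "The password you entered does not contain a number."),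
--     ]
--     for bad, msg in checks:
--         if bad:
--             numberOfErrors += 1
--             errorMessages += str(numberOfErrors) + ": " + msg + "\n"
--     return [numberOfErrors, errorMessages]
-- ===== Notes on version B (the rewrite author's own statement) =====
-- stated objective: idiomatic
-- what changed: Replaces A's fused early-exit while loop with flag bookkeeping and six sequential if-blocks by three independent any() membership scans and a single fold over a (condition, message) table.
import Mathlib
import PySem

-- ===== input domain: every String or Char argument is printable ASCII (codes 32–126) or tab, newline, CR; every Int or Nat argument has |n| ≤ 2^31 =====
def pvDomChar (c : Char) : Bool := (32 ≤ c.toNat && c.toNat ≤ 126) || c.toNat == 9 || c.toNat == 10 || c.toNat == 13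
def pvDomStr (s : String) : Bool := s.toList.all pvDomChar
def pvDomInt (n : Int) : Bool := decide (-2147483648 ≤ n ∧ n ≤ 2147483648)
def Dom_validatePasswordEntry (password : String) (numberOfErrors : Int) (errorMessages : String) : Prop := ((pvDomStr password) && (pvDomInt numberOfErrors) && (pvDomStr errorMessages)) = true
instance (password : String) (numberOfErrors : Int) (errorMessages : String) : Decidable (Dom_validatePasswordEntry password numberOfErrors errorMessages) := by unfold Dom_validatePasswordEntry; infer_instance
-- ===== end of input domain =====

-- B replaces A's fused early-exit character scan and six sequential if-blocks by three
-- independent any-scans and one fold over a (condition, message) table; objective: simpler/idiomatic.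
-- (`isnumeric` is ported as PySem.Chars.isdigit: the two agree on every ASCII character, hence on all of Dom.)

-- ===== PORT A =====
-- 'numberOfErrors += 1; errorMessages += str(numberOfErrors) + <msg>' as a helper
def vpeAdd (st : Int × List Char) (msg : List Char) : Int × List Char :=
  (st.1 + 1, st.2 ++ PySem.Int.toChars (st.1 + 1) ++ msg)

-- the while loop of A: early exit once all three flags are set, elif chain in A's order
def vpeLoopA : List Char → Bool → Bool → Bool → Bool × Bool × Bool
  | [], fu, fl, fn => (fu, fl, fn)
  | c :: rest, fu, fl, fn =>
    if fu && fl && fn then (fu, fl, fn)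
    else if PySem.Chars.isupper c && !fu then vpeLoopA rest true fl fn
    else if PySem.Chars.islower c && !fl then vpeLoopA rest fu true fn
    else if PySem.Chars.isdigit c && !fn then vpeLoopA rest fu fl true
    else vpeLoopA rest fu fl fn

def validatePasswordEntry (password : String) (numberOfErrors : Int) (errorMessages : String) : Int × String :=
  let cs := password.toList
  let st0 : Int × List Char := (numberOfErrors, errorMessages.toList)
  let st1 := if cs = [] then vpeAdd st0 ": You have not entered a password.\n".toList else st0
  let st2 := if cs.length < 3 then vpeAdd st1 ": The password you entered is too short. It must be at least 3 characters in length.\n".toList else st1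
  let st3 := if cs.length > 50 then vpeAdd st2 ": The password you entered is too long (max 50 characters).\n".toList else st2
  let f := vpeLoopA cs false false false
  let st4 := if f.1 = false then vpeAdd st3 ": The password you entered does not contain an uppercase character.\n".toList else st3
  let st5 := if f.2.1 = false then vpeAdd st4 ": The password you entered does not contain a lowercase character.\n".toList else st4
  let st6 := if f.2.2 = false then vpeAdd st5 ": The password you entered does not contain a number.\n".toList else st5
  (st6.1, String.ofList st6.2)

-- ===== PORT B =====
def vpeChecks (cs : List Char) : List (Bool × List Char) :=
  [ (cs.isEmpty, "You have not entered a password.".toList),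
    (decide (cs.length < 3), "The password you entered is too short. It must be at least 3 characters in length.".toList),
    (decide (cs.length > 50), "The password you entered is too long (max 50 characters).".toList),
    (!(cs.any PySem.Chars.isupper), "The password you entered does not contain an uppercase character.".toList),
    (!(cs.any PySem.Chars.islower), "The password you entered does not contain a lowercase character.".toList),
    (!(cs.any PySem.Chars.isdigit), "The password you entered does not contain a number.".toList) ]

def vpeStepB (acc : Int × List Char) (bm : Bool × List Char) : Int × List Char :=
  if bm.1 then (acc.1 + 1, acc.2 ++ PySem.Int.toChars (acc.1 + 1) ++ ": ".toList ++ bm.2 ++ ['\n']) else acc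

def validatePasswordEntry_alt (password : String) (numberOfErrors : Int) (errorMessages : String) : Int × String :=
  let r := (vpeChecks password.toList).foldl vpeStepB (numberOfErrors, errorMessages.toList)
  (r.1, String.ofList r.2)

-- ===== PRECONDITION & SPEC =====
def Spec_validatePasswordEntry (password : String) (numberOfErrors : Int) (errorMessages : String) (out : Int × String) : Prop := out = validatePasswordEntry_alt password numberOfErrors errorMessages
instance (password : String) (numberOfErrors : Int) (errorMessages : String) (out : Int × String) : Decidable (Spec_validatePasswordEntry password numberOfErrors errorMessages out) := by unfold Spec_validatePasswordEntry; infer_instance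

-- ===== CLAIM (what is proved, stated in full; the proofs are below) =====
def Claim_equal_validatePasswordEntry : Prop := ∀ (password : String) (numberOfErrors : Int) (errorMessages : String), Dom_validatePasswordEntry password numberOfErrors errorMessages → Spec_validatePasswordEntry password numberOfErrors errorMessages (validatePasswordEntry password numberOfErrors errorMessages)

-- ===== LEMMAS AND PROOFS =====
theorem vpeCharVals : 'A'.val.toNat = 65 ∧ 'Z'.val.toNat = 90 ∧ 'a'.val.toNat = 97 ∧ 'z'.val.toNat = 122 ∧ '0'.val.toNat = 48 ∧ '9'.val.toNat = 57 := by decide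

theorem not_islower_of_isupper (c : Char) (h : PySem.Chars.isupper c = true) : PySem.Chars.islower c = false := by
  simp only [PySem.Chars.isupper, PySem.Chars.islower, Bool.and_eq_true, decide_eq_true_eq,
    Char.le_def, UInt32.le_iff_toNat_le, Bool.and_eq_false_iff, decide_eq_false_iff_not, not_le] at *
  have := vpeCharVals; omega

theorem not_isdigit_of_isupper (c : Char) (h : PySem.Chars.isupper c = true) : PySem.Chars.isdigit c = false := by
  simp only [PySem.Chars.isupper, PySem.Chars.isdigit, Bool.and_eq_true, decide_eq_true_eq,
    Char.le_def, UInt32.le_iff_toNat_le, Bool.and_eq_false_iff, decide_eq_false_iff_not, not_le] at *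
  have := vpeCharVals; omega

theorem not_isdigit_of_islower (c : Char) (h : PySem.Chars.islower c = true) : PySem.Chars.isdigit c = false := by
  simp only [PySem.Chars.islower, PySem.Chars.isdigit, Bool.and_eq_true, decide_eq_true_eq,
    Char.le_def, UInt32.le_iff_toNat_le, Bool.and_eq_false_iff, decide_eq_false_iff_not, not_le] at *
  have := vpeCharVals; omega

theorem vpeLoopA_eq_any (cs : List Char) (fu fl fn : Bool) :
    vpeLoopA cs fu fl fn =
      (fu || cs.any PySem.Chars.isupper, fl || cs.any PySem.Chars.islower, fn || cs.any PySem.Chars.isdigit) := by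
  induction cs generalizing fu fl fn with
  | nil => simp [vpeLoopA]
  | cons c rest ih =>
    cases fu <;> cases fl <;> cases fn <;>
      cases hu : PySem.Chars.isupper c <;> cases hl : PySem.Chars.islower c <;> cases hd : PySem.Chars.isdigit c <;>
      simp_all [vpeLoopA, not_islower_of_isupper, not_isdigit_of_isupper, not_isdigit_of_islower]

theorem vpeStep_eq (st : Int × List Char) (P : Prop) [Decidable P] (b : Bool) (hPb : P ↔ b = true)
    (m L : List Char) (hL : L = ": ".toList ++ m ++ ['\n']) :
    (if P then vpeAdd st L else st) = vpeStepB st (b, m) := by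
  subst hL
  by_cases hb : b = true
  · rw [if_pos (hPb.mpr hb)]
    simp [vpeStepB, vpeAdd, hb, List.append_assoc]
  · rw [if_neg (fun hp => hb (hPb.mp hp))]
    simp [vpeStepB, Bool.eq_false_iff.mpr hb]

-- ===== VERDICT (by name: the statement is the Claim_ definition above) =====
theorem validatePasswordEntry_spec : Claim_equal_validatePasswordEntry := by
  intro password n errs _
  unfold Spec_validatePasswordEntry validatePasswordEntry validatePasswordEntry_alt vpeChecks
  simp only [vpeLoopA_eq_any, Bool.false_or, List.foldl_cons, List.foldl_nil]
  rw [vpeStep_eq _ (password.toList = []) password.toList.isEmpty (by simp) "You have not entered a password.".toList _ (by decide),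
      vpeStep_eq _ (password.toList.length < 3) (decide (password.toList.length < 3)) (by simp) "The password you entered is too short. It must be at least 3 characters in length.".toList _ (by decide),
      vpeStep_eq _ (password.toList.length > 50) (decide (password.toList.length > 50)) (by simp) "The password you entered is too long (max 50 characters).".toList _ (by decide),
      vpeStep_eq _ (password.toList.any PySem.Chars.isupper = false) (!(password.toList.any PySem.Chars.isupper)) (by simp) "The password you entered does not contain an uppercase character.".toList _ (by decide),
      vpeStep_eq _ (password.toList.any PySem.Chars.islower = false) (!(password.toList.any PySem.Chars.islower)) (by simp) "The password you entered does not contain a lowercase character.".toList _ (by decide),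
      vpeStep_eq _ (password.toList.any PySem.Chars.isdigit = false) (!(password.toList.any PySem.Chars.isdigit)) (by simp) "The password you entered does not contain a number.".toList _ (by decide)]
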